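-- pv_equiv track=rewrite | github.com/pro-vi/mdtools | bench/command_policy.py | _extract_md_subcommand
-- ===== SOURCE A (Python) =====
-- def normalize_command(token: str) -> str:
--     return "md" if token == "./md" else token
--
-- def _extract_md_subcommand(tokens: list[str]) -> str | None:
--     found_md = False
--     for token in tokens:
--         if token in {"|", ">", ">>", "<"}:
--             if found_md:
--                 break
--             continue
--         if not found_md:
--             if normalize_command(token) == "md":
--                 found_md = True
--             continue
--         return token
--     return None
-- ===== SOURCE B (Python) =====
-- def normalize_command(token: str) -> str:
--     return "md" if token == "./md" else token
--
-- _OPERATORS = {"|", ">", ">>", "<"}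
--
-- def _extract_md_subcommand(tokens: list[str]) -> str | None:
--     # Backward pass: walk the list right-to-left carrying the token seen just to
--     # the right (nxt). Each 'md'/'./md' token overwrites the answer with its
--     # successor (or None if absent/an operator); the leftmost md is processed
--     # last, so its answer wins.
--     result = None
--     nxt = None
--     for tok in reversed(tokens):
--         if normalize_command(tok) == "md":
--             result = nxt if nxt is not None and nxt not in _OPERATORS else None
--         nxt = tok
--     return result
-- ===== Notes on version B (the rewrite author's own statement) =====
-- stated objective: alternative
-- what changed: B traverses the token list backwards in a single right-to-left fold carrying the previously seen token (the successor), letting each md token overwrite the answer so the leftmost md's successor wins, instead of A's forward scan with a found_md flag and break/continue.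
import Mathlib
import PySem

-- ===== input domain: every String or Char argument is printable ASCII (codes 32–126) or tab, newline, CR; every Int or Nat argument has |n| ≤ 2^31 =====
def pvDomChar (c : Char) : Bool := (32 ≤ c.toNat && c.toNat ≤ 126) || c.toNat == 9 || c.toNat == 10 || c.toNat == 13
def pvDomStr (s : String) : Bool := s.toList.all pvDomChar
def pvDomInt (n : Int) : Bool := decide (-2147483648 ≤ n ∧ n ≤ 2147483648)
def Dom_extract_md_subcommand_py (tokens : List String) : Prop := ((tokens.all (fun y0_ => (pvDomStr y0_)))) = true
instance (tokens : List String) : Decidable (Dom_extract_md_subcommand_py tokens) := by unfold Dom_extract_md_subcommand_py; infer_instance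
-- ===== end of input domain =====

-- B replaces A's forward flag-scan with a backward pass: fold the list right-to-left carrying the token seen just to the right; each 'md' overwrites the answer with its successor, so the leftmost md wins (alternative decomposition, same O(n) cost).


-- ===== PORT A =====
def normalize_command_py (token : String) : String := if token = "./md" then "md" else token

-- the operator set {"|", ">", ">>", "<"}
def pvOps : List String := ["|", ">", ">>", "<"]

-- A's for-loop with the found_md flag; 'break' and loop exhaustion both yield none
def pvGoA (found_md : Bool) : List String → Option String
  | [] => none
  | token :: rest =>
    if token ∈ pvOps then
      if found_md then none else pvGoA found_md rest
    else if !found_md then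
      pvGoA (if normalize_command_py token = "md" then true else found_md) rest
    else some token

def extract_md_subcommand_py (tokens : List String) : Option String := pvGoA false tokens

-- ===== PORT B =====
-- Source B's loop body over 'reversed(tokens)': state is (result, nxt)
def pvStepB (st : Option String × Option String) (tok : String) : Option String × Option String :=
  ( if normalize_command_py tok = "md" then
      match st.2 with
      | none => none
      | some n => if n ∈ pvOps then none else some n
    else st.1
  , some tok )

def extract_md_subcommand_py_alt (tokens : List String) : Option String :=
  (tokens.reverse.foldl pvStepB (none, none)).1

-- ===== PRECONDITION & SPEC =====
def Spec_extract_md_subcommand_py (tokens : List String) (out : Option String) : Prop := out = extract_md_subcommand_py_alt tokens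
instance (tokens : List String) (out : Option String) : Decidable (Spec_extract_md_subcommand_py tokens out) := by unfold Spec_extract_md_subcommand_py; infer_instance

-- ===== CLAIM (what is proved, stated in full; the proofs are below) =====
def Claim_equal_extract_md_subcommand_py : Prop := ∀ (tokens : List String), Dom_extract_md_subcommand_py tokens → Spec_extract_md_subcommand_py tokens (extract_md_subcommand_py tokens)

-- ===== LEMMAS AND PROOFS =====

-- the right fold B's reversed foldl amounts to
def pvFoldB (ts : List String) : Option String × Option String :=
  ts.foldr (fun tok st => pvStepB st tok) (none, none)

theorem alt_eq_foldB (ts : List String) :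
    extract_md_subcommand_py_alt ts = (pvFoldB ts).1 := by
  unfold extract_md_subcommand_py_alt pvFoldB
  rw [List.foldl_reverse]

-- the carried 'nxt' is the head of the suffix processed so far
theorem pvFoldB_snd (ts : List String) : (pvFoldB ts).2 = ts.head? := by
  cases ts with
  | nil => rfl
  | cons h t => simp [pvFoldB, pvStepB]

-- after the flag is set, A returns the next non-operator token or none
theorem pvGoA_true (ts : List String) :
    pvGoA true ts = match ts with
      | [] => none
      | t :: _ => if t ∈ pvOps then none else some t := by
  cases ts with
  | nil => rfl
  | cons t rest => simp [pvGoA]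

theorem pvGoA_false_cons (h : String) (t : List String) :
    pvGoA false (h :: t) = if h ∈ pvOps then pvGoA false t
      else if normalize_command_py h = "md" then pvGoA true t else pvGoA false t := by
  by_cases hop : h ∈ pvOps <;> by_cases hmd : normalize_command_py h = "md" <;>
    simp [pvGoA, hop, hmd]

theorem foldB_eq_goA (ts : List String) : (pvFoldB ts).1 = pvGoA false ts := by
  induction ts with
  | nil => rfl
  | cons h t ih =>
    have e : pvFoldB (h :: t) = pvStepB (pvFoldB t) h := rfl
    rw [e, pvGoA_false_cons]
    by_cases hmd : normalize_command_py h = "md"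
    · have hop : h ∉ pvOps := by
        intro hin
        fin_cases hin <;> simp_all [normalize_command_py]
      unfold pvStepB
      simp only [hmd, if_pos, hop, if_neg, if_true]
      rw [pvFoldB_snd, pvGoA_true]
      cases t with
      | nil => rfl
      | cons x rest => simp
    · unfold pvStepB
      simp only [hmd, if_false]
      rw [ih]
      by_cases hop : h ∈ pvOps <;> simp [hop, hmd]

-- ===== VERDICT (by name: the statement is the Claim_ definition above) =====
theorem extract_md_subcommand_py_spec : Claim_equal_extract_md_subcommand_py := by
  intro tokens _
  unfold Spec_extract_md_subcommand_py extract_md_subcommand_py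
  rw [alt_eq_foldB, foldB_eq_goA]
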